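-- pv_equiv track=rewrite | github.com/Intelligent-CAT-Lab/CS527JBR-Team-0 | graphectory/lang_construction/computeLCP.py | _max_repeat_k
-- ===== SOURCE A (Python) =====
-- from typing import List, Tuple, Optional
--
-- def _max_repeat_k(seq: List[str], i: int, L: int) -> int:
--     """Find maximum repetitions of a period starting at position i."""
--     n = len(seq)
--     if i + L > n:
--         return 1
--     pat = seq[i:i+L]
--     k = 1
--     pos = i + L
--     while pos + L <= n and seq[pos:pos+L] == pat:
--         k += 1
--         pos += L
--     return k
-- ===== SOURCE B (Python) =====
-- from typing import List
--
-- def _max_repeat_k(seq: List[str], i: int, L: int) -> int: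
--     """Find maximum repetitions of a period starting at position i."""
--     n = len(seq)
--     if i + L > n:
--         return 1
--     # single element-wise scan: extend j while seq[j] matches seq[j - L];
--     # each L full matched elements make one further copy of the period
--     j = i + L
--     while j < n and seq[j] == seq[j - L]:
--         j += 1
--     return 1 + (j - (i + L)) // L
-- ===== Notes on version B (the rewrite author's own statement) =====
-- stated objective: alternative
-- what changed: Replaces the slice-by-slice block comparison loop (build pat, compare seq[pos:pos+L] == pat per step of L) by a single element-wise scan seq[j] == seq[j-L] advancing j by 1, returning 1 + run_length // L; no slices are built or compared.
-- outside the precondition, e.g. on _max_repeat_k(['a', 'a'], -2, 1): A returns 1, B returns 4; on _max_repeat_k(['a', 'a'], -3, 1): A returns 1, B raises IndexError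
import Mathlib
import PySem

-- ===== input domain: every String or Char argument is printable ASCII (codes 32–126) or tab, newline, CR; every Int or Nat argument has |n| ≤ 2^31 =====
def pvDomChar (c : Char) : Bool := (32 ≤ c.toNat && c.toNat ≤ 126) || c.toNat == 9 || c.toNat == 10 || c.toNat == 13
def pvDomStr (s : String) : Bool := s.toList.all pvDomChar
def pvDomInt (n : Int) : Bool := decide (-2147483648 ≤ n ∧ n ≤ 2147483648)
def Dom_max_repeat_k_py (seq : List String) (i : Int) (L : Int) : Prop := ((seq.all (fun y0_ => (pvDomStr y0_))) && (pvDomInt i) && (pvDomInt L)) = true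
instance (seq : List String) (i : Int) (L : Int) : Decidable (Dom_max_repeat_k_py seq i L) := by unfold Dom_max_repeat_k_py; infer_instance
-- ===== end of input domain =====

-- B replaces A's slice-per-block comparison loop by a single element-wise scan (seq[j] == seq[j-L]),
-- returning 1 + run_length // L; same value on the natural domain, no slices built.

-- ===== PORT A =====
-- the while loop of A: k = 1; pos = i+L; while pos+L <= n and seq[pos:pos+L] == pat: k += 1; pos += L
-- (fuel recursion; fuel seq.length+1 suffices on Pre_, where each step advances pos by L ≥ 1)
def pvAloop (seq : List String) (pat : List String) (n L : Int) : Nat → Int → Int → Int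
  | 0, _, k => k
  | f + 1, pos, k =>
    if pos + L ≤ n ∧ PySem.List.slice seq (some pos) (some (pos + L)) = pat then
      pvAloop seq pat n L f (pos + L) (k + 1)
    else k

def max_repeat_k_py (seq : List String) (i : Int) (L : Int) : Int :=
  if i + L > (seq.length : Int) then 1
  else
    pvAloop seq (PySem.List.slice seq (some i) (some (i + L))) (seq.length : Int) L
      (seq.length + 1) (i + L) 1

-- ===== PORT B =====
-- the while loop of B: j = i+L; while j < n and seq[j] == seq[j-L]: j += 1   (returns final j)
def pvBloop (seq : List String) (n L : Int) : Nat → Int → Int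
  | 0, j => j
  | f + 1, j =>
    if j < n ∧ PySem.List.pyGet? seq j = PySem.List.pyGet? seq (j - L) then
      pvBloop seq n L f (j + 1)
    else j

def max_repeat_k_py_alt (seq : List String) (i : Int) (L : Int) : Int :=
  if i + L > (seq.length : Int) then 1
  else
    1 + PySem.Int.floordiv (pvBloop seq (seq.length : Int) L (seq.length + 1) (i + L) - (i + L)) L

-- ===== PRECONDITION & SPEC =====
-- Pre_ excludes negative start positions i with i+L ≤ len(seq) (outside the function's natural
-- domain; A's value there is Python's negative-index slice wraparound, on which B raises or differs)
-- and non-positive periods L with i+L ≤ len(seq), on which A loops forever.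
def Pre_max_repeat_k_py (seq : List String) (i : Int) (L : Int) : Prop :=
  (0 ≤ i ∧ 1 ≤ L) ∨ (seq.length : Int) < i + L
instance (seq : List String) (i : Int) (L : Int) : Decidable (Pre_max_repeat_k_py seq i L) := by
  unfold Pre_max_repeat_k_py; infer_instance

def pvWitness_max_repeat_k_py : List String × Int × Int := (["a", "b", "a", "b", "a"], 0, 2)

def Spec_max_repeat_k_py (seq : List String) (i : Int) (L : Int) (out : Int) : Prop := out = max_repeat_k_py_alt seq i L
instance (seq : List String) (i : Int) (L : Int) (out : Int) : Decidable (Spec_max_repeat_k_py seq i L out) := by unfold Spec_max_repeat_k_py; infer_instance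

-- ===== CLAIM (what is proved, stated in full; the proofs are below) =====
def Claim_equal_max_repeat_k_py : Prop := ∀ (seq : List String) (i : Int) (L : Int), Dom_max_repeat_k_py seq i L → Pre_max_repeat_k_py seq i L → Spec_max_repeat_k_py seq i L (max_repeat_k_py seq i L)

-- ===== LEMMAS AND PROOFS =====

-- the stopping index of B's scan (with the fuel the port uses)
def pvBstop (seq : List String) (L : Int) (j : Int) : Int :=
  pvBloop seq (seq.length : Int) L (seq.length + 1) j

-- B's loop does not depend on the fuel, as soon as the fuel covers n - j
lemma pvBloop_fuel (seq : List String) (L : Int) :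
    ∀ (f f' : Nat) (j : Int), j ≤ (seq.length : Int) →
      (seq.length : Int) - j ≤ (f : Int) → (seq.length : Int) - j ≤ (f' : Int) →
      pvBloop seq (seq.length : Int) L f j = pvBloop seq (seq.length : Int) L f' j := by
  intro f
  induction f with
  | zero =>
    intro f' j hj hf _
    have hjn : j = (seq.length : Int) := by omega
    subst hjn
    cases f' with
    | zero => rfl
    | succ f' =>
      simp [pvBloop]
  | succ f ih =>
    intro f' j hj hf hf'
    cases f' with
    | zero =>
      have hjn : j = (seq.length : Int) := by omega
      subst hjn
      simp [pvBloop]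
    | succ f' =>
      by_cases h : j < (seq.length : Int) ∧
          PySem.List.pyGet? seq j = PySem.List.pyGet? seq (j - L)
      · simp only [pvBloop, if_pos h]
        exact ih f' (j + 1) (by omega) (by omega) (by omega)
      · simp only [pvBloop, if_neg h]

-- specification of B's loop: it stops at the first index failing the scan condition
lemma pvBloop_spec (seq : List String) (L : Int) :
    ∀ (f : Nat) (j : Int), j ≤ (seq.length : Int) →
      (seq.length : Int) - j ≤ (f : Int) →
      j ≤ pvBloop seq (seq.length : Int) L f j ∧
      pvBloop seq (seq.length : Int) L f j ≤ (seq.length : Int) ∧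
      (∀ x, j ≤ x → x < pvBloop seq (seq.length : Int) L f j →
        PySem.List.pyGet? seq x = PySem.List.pyGet? seq (x - L)) ∧
      ¬ (pvBloop seq (seq.length : Int) L f j < (seq.length : Int) ∧
          PySem.List.pyGet? seq (pvBloop seq (seq.length : Int) L f j)
            = PySem.List.pyGet? seq (pvBloop seq (seq.length : Int) L f j - L)) := by
  intro f
  induction f with
  | zero =>
    intro j hj hf
    have hjn : j = (seq.length : Int) := by omega
    subst hjn
    refine ⟨le_refl _, le_refl _, ?_, ?_⟩
    · intro x hx hx'; simp [pvBloop] at hx'; omega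
    · simp [pvBloop]
  | succ f ih =>
    intro j hj hf
    by_cases h : j < (seq.length : Int) ∧
        PySem.List.pyGet? seq j = PySem.List.pyGet? seq (j - L)
    · simp only [pvBloop, if_pos h]
      obtain ⟨h1, h2, h3, h4⟩ := ih (j + 1) (by omega) (by omega)
      refine ⟨by omega, h2, ?_, h4⟩
      intro x hx hx'
      rcases eq_or_lt_of_le hx with he | hlt
      · subst he; exact h.2
      · exact h3 x (by omega) hx'
    · simp only [pvBloop, if_neg h]
      exact ⟨le_refl _, hj, fun x hx hx' => by omega, h⟩

-- one matched scan element pushes the stop index past it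
lemma pvBstop_step (seq : List String) (L : Int) (j : Int) (hj : 0 ≤ j)
    (hc : j < (seq.length : Int) ∧
      PySem.List.pyGet? seq j = PySem.List.pyGet? seq (j - L)) :
    pvBstop seq L j = pvBstop seq L (j + 1) := by
  unfold pvBstop
  show pvBloop seq (seq.length : Int) L (seq.length + 1) j = _
  simp only [pvBloop, if_pos hc]
  exact pvBloop_fuel seq L seq.length (seq.length + 1) (j + 1) (by omega)
    (by omega) (by push_cast; omega)

-- a fully matched stretch of d elements pushes the stop index past all of it
lemma pvBstop_run (seq : List String) (L : Int) :
    ∀ (d : Nat) (j : Int), 0 ≤ j → j + (d : Int) ≤ (seq.length : Int) →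
      (∀ x, j ≤ x → x < j + (d : Int) →
        PySem.List.pyGet? seq x = PySem.List.pyGet? seq (x - L)) →
      pvBstop seq L j = pvBstop seq L (j + (d : Int)) := by
  intro d
  induction d with
  | zero => intro j _ _ _; simp
  | succ d ih =>
    intro j hj hjd hall
    have h1 : pvBstop seq L j = pvBstop seq L (j + 1) :=
      pvBstop_step seq L j hj ⟨by push_cast at hjd; omega,
        hall j (le_refl _) (by push_cast; omega)⟩
    rw [h1, ih (j + 1) (by omega) (by push_cast at *; omega)
      (fun x hx hx' => hall x (by omega) (by push_cast at *; omega))]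
    congr 1
    push_cast
    ring

-- element-wise description of a length-L slice
lemma pvSlice_eq (seq : List String) (a L : Int) (ha : 0 ≤ a) (hL : 0 ≤ L)
    (hn : a + L ≤ (seq.length : Int)) :
    PySem.List.slice seq (some a) (some (a + L)) =
      (List.range L.toNat).map (fun r => seq[a.toNat + r]!) := by
  rw [PySem.List.slice_toNat seq ha (by omega)]
  have hlen : (L.toNat : Int) = L := Int.toNat_of_nonneg hL
  have hsub : (a + L).toNat - a.toNat = L.toNat := by omega
  rw [hsub]
  apply List.ext_getElem
  · simp [List.length_take, List.length_drop]
    omega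
  · intro r h1 h2
    have hr : r < L.toNat := by simpa using h2
    have har : a.toNat + r < seq.length := by omega
    simp [List.getElem_take, List.getElem_drop, List.getElem!_eq_getElem?_getD, har]

-- block equality (against the immediately preceding block) ↔ element-wise matches
lemma pvBlock_iff (seq : List String) (a L : Int) (haL : 0 ≤ a - L) (hL : 1 ≤ L)
    (hn : a + L ≤ (seq.length : Int)) :
    (PySem.List.slice seq (some a) (some (a + L)) =
        PySem.List.slice seq (some (a - L)) (some a)) ↔
      (∀ x, a ≤ x → x < a + L →
        PySem.List.pyGet? seq x = PySem.List.pyGet? seq (x - L)) := by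
  have ha : 0 ≤ a := by omega
  rw [pvSlice_eq seq a L ha (by omega) hn]
  have h2 : a - L + L = a := by omega
  have h2' : PySem.List.slice seq (some (a - L)) (some a) =
      (List.range L.toNat).map (fun r => seq[(a - L).toNat + r]!) := by
    have := pvSlice_eq seq (a - L) L haL (by omega) (by omega)
    rwa [h2] at this
  rw [h2']
  constructor
  · intro heq x hx hx'
    have hr : (x - a).toNat < L.toNat := by omega
    have := congrArg (fun l => l[(x - a).toNat]!) heq
    simp only [List.getElem!_eq_getElem?_getD, List.getElem?_map,
      List.getElem?_range, hr] at this
    simp only [Option.map_some, Option.getD_some] at this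
    have hx0 : 0 ≤ x := by omega
    have hxL0 : 0 ≤ x - L := by omega
    rw [PySem.List.pyGet?_of_nonneg seq hx0, PySem.List.pyGet?_of_nonneg seq hxL0]
    have e1 : a.toNat + (x - a).toNat = x.toNat := by omega
    have e2 : (a - L).toNat + (x - a).toNat = (x - L).toNat := by omega
    rw [e1, e2] at this
    have hxn : x.toNat < seq.length := by omega
    have hxLn : (x - L).toNat < seq.length := by omega
    simp [hxn, hxLn] at this ⊢
    exact this
  · intro hall
    apply List.ext_getElem
    · simp
    · intro r h1 h2
      have hr : r < L.toNat := by simpa using h1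
      have hx := hall (a + r) (by omega) (by omega)
      have hx0 : 0 ≤ a + (r : Int) := by omega
      rw [PySem.List.pyGet?_of_nonneg seq hx0,
        PySem.List.pyGet?_of_nonneg seq (by omega : (0:Int) ≤ a + (r:Int) - L)] at hx
      have e1 : (a + (r : Int)).toNat = a.toNat + r := by omega
      have e2 : (a + (r : Int) - L).toNat = (a - L).toNat + r := by omega
      rw [e1, e2] at hx
      have hxn : a.toNat + r < seq.length := by omega
      have hxLn : (a - L).toNat + r < seq.length := by omega
      simp only [List.getElem?_eq_getElem, hxn, hxLn] at hx
      simp only [List.getElem_map, List.getElem_range]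
      simp [hxn, hxLn]
      exact Option.some_injective _ hx

-- main loop correspondence: A's block loop equals k + (scan run)/L
lemma pvMain (seq : List String) (L : Int) (hL : 1 ≤ L) (pat : List String) :
    ∀ (f : Nat) (pos k : Int), 0 ≤ pos - L → pos ≤ (seq.length : Int) →
      (seq.length : Int) - pos ≤ (f : Int) →
      PySem.List.slice seq (some (pos - L)) (some pos) = pat →
      pvAloop seq pat (seq.length : Int) L f pos k =
        k + PySem.Int.floordiv (pvBstop seq L pos - pos) L := by
  intro f
  induction f with
  | zero =>
    intro pos k h0 hn hf hinv
    have hpn : pos = (seq.length : Int) := by omega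
    subst hpn
    obtain ⟨h1, h2, _, _⟩ := pvBloop_spec seq L (seq.length + 1) (seq.length : Int)
      (le_refl _) (by push_cast; omega)
    have : pvBstop seq L (seq.length : Int) = (seq.length : Int) := by
      unfold pvBstop; omega
    rw [pvAloop, this]
    simp [PySem.Int.floordiv]
  | succ f ih =>
    intro pos k h0 hn hf hinv
    obtain ⟨hs1, hs2, hs3, hs4⟩ := pvBloop_spec seq L (seq.length + 1) pos
      (by omega) (by push_cast; omega)
    have hsb1 : pos ≤ pvBstop seq L pos := hs1
    have hsb2 : pvBstop seq L pos ≤ (seq.length : Int) := hs2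
    have hs3' : ∀ x, pos ≤ x → x < pvBstop seq L pos →
        PySem.List.pyGet? seq x = PySem.List.pyGet? seq (x - L) := hs3
    by_cases hc : pos + L ≤ (seq.length : Int) ∧
        PySem.List.slice seq (some pos) (some (pos + L)) = pat
    · simp only [pvAloop, if_pos hc]
      -- the matched block matches the previous block element-wise
      have hblock : PySem.List.slice seq (some pos) (some (pos + L)) =
          PySem.List.slice seq (some (pos - L)) (some pos) := hc.2.trans hinv.symm
      have hall := (pvBlock_iff seq pos L h0 hL hc.1).1 hblock
      have hrun : pvBstop seq L pos = pvBstop seq L (pos + L) := by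
        have := pvBstop_run seq L L.toNat pos (by omega)
          (by rw [Int.toNat_of_nonneg (by omega)]; exact hc.1)
          (by rw [Int.toNat_of_nonneg (by omega)]; exact hall)
        rwa [Int.toNat_of_nonneg (by omega : (0:Int) ≤ L)] at this
      rw [ih (pos + L) (k + 1) (by omega) hc.1 (by push_cast at *; omega)
        (by rw [show pos + L - L = pos by ring]; exact hc.2)]
      rw [← hrun]
      have hpos : 0 < L := by omega
      rw [PySem.Int.floordiv_eq_ediv_of_pos hpos, PySem.Int.floordiv_eq_ediv_of_pos hpos]
      have harith : pvBstop seq L pos - (pos + L) =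
          (pvBstop seq L pos - pos) + (-1) * L := by ring
      rw [harith, Int.add_mul_ediv_right _ _ (by omega : L ≠ 0)]
      ring
    · simp only [pvAloop, if_neg hc]
      -- the stop index lies strictly within the first unmatched block
      have hlt : pvBstop seq L pos < pos + L := by
        by_contra hge
        push Not at hge
        rcases not_and_or.mp hc with hn1 | hn2
        · omega
        · exact hn2 (hinv ▸ (pvBlock_iff seq pos L h0 hL (by omega)).2
            (fun x hx hx' => hs3' x hx (by omega)))
      have hz : PySem.Int.floordiv (pvBstop seq L pos - pos) L = 0 := by
        rw [PySem.Int.floordiv_eq_ediv_of_pos (by omega)]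
        exact Int.ediv_eq_zero_of_lt (by omega) (by omega)
      rw [hz]; ring

-- ===== VERDICT (by name: the statement is the Claim_ definition above) =====
theorem max_repeat_k_py_spec : Claim_equal_max_repeat_k_py := by
  intro seq i L _ hpre
  unfold Spec_max_repeat_k_py max_repeat_k_py max_repeat_k_py_alt
  by_cases h : i + L > (seq.length : Int)
  · simp [h]
  · have hiL : i + L ≤ (seq.length : Int) := by omega
    obtain ⟨hi, hL⟩ : 0 ≤ i ∧ 1 ≤ L := by
      rcases hpre with h' | h'
      · exact h'
      · omega
    simp only [if_neg h]
    rw [pvMain seq L hL _ (seq.length + 1) (i + L) 1 (by omega) hiL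
      (by push_cast; omega) (by rw [show i + L - L = i by ring])]
    unfold pvBstop
    ring
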